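-- pv_equiv track=rewrite | github.com/youssef24413/CyberSecurity_project | cyber.py | convert_key_to_matrix
-- ===== SOURCE A (Python) =====
-- def convert_key_to_matrix(key):
--     key = key.upper()
--     if not key.isalpha():
--         return None
--     key_length = len(key)
--     matrix_size = int(key_length ** 0.5)
--     if matrix_size * matrix_size != key_length:
--         return None
--     key_matrix = [[0 for _ in range(matrix_size)] for _ in range(matrix_size)]
--     index = 0
--     for i in range(matrix_size):
--         for j in range(matrix_size):
--             key_matrix[i][j] = ord(key[index]) - ord('A')
--             index += 1
--     return key_matrix
-- ===== SOURCE B (Python) =====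
-- def convert_key_to_matrix(key):
--     key = key.upper()
--     if not key.isalpha():
--         return None
--     n = 0
--     while n * n < len(key):
--         n += 1
--     if n * n != len(key):
--         return None
--
--     def rows(s):
--         if not s:
--             return []
--         return [[ord(c) - ord('A') for c in s[:n]]] + rows(s[n:])
--
--     return rows(key)
-- ===== Notes on version B (the rewrite author's own statement) =====
-- stated objective: alternative
-- what changed: Replaces the float-sqrt size computation, preallocated zero matrix and nested index-assignment loops with a running counter by an incremental integer search for the side length plus a recursive chunker that peels one row off the front of the string at a time.
import Mathlib
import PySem

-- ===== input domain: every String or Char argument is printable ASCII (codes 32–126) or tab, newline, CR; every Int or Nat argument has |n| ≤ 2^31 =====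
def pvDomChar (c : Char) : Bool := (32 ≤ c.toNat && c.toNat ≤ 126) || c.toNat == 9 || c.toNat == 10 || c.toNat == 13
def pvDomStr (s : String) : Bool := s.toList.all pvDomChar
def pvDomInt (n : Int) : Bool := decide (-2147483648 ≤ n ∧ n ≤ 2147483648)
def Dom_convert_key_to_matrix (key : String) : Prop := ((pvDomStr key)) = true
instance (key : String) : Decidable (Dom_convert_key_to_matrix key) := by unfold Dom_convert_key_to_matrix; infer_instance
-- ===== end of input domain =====

-- B replaces A's float-sqrt size computation, preallocated zero matrix and nested
-- index-assignment loops with a running counter by an incremental integer search for the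
-- side length and a recursive chunker peeling one row off the front of the string
-- (alternative decomposition, same cost).

-- ===== PORT A =====
-- Literal transliteration of A.  `int(key_length ** 0.5)` is ported as Nat.sqrt (exact for
-- the lengths at hand).  key[index] is always in range here, so getD's default is unreachable.
def convert_key_to_matrix (key : String) : Option (List (List Int)) :=
  let ks := (PySem.Str.upper key).toList
  if !PySem.Chars.strIsalpha ks then none
  else
    let key_length := ks.length
    let matrix_size := Nat.sqrt key_length
    if matrix_size * matrix_size ≠ key_length then none
    else
      let init : List (List Int) :=
        (List.range matrix_size).map (fun _ => (List.range matrix_size).map (fun _ => (0 : Int)))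
      let res := (List.range matrix_size).foldl
        (fun (st : List (List Int) × Nat) i =>
          (List.range matrix_size).foldl
            (fun (st : List (List Int) × Nat) j =>
              (st.1.set i ((st.1.getD i []).set j (((ks.getD st.2 'A').toNat : Int) - 65)),
               st.2 + 1)) st)
        (init, 0)
      some res.1

-- ===== PORT B =====
-- B's `while n * n < len(key): n += 1`, a plain recursion on the growing counter.
def findN (L : Nat) (n : Nat) : Nat :=
  if h : n * n < L then findN L (n + 1) else n
termination_by L - n
decreasing_by
  rcases Nat.eq_zero_or_pos n with h0 | h0
  · subst h0; omega
  · have hle : n ≤ n * n := Nat.le_mul_of_pos_left n h0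
    omega

-- B's recursive `rows`: peel the first n characters off as a row, recurse on the rest.
-- The fuel argument only makes the recursion structural; B calls it with fuel = length,
-- enough for every chunk, so the 0-fuel arm is unreachable.
def rowsB (n : Nat) : Nat → List Char → List (List Int)
  | _, [] => []
  | 0, _ => []
  | fuel + 1, s => (s.take n).map (fun c => ((c.toNat : Int) - 65)) :: rowsB n fuel (s.drop n)

def convert_key_to_matrix_alt (key : String) : Option (List (List Int)) :=
  let ks := (PySem.Str.upper key).toList
  if !PySem.Chars.strIsalpha ks then none
  else
    let n := findN ks.length 0
    if n * n ≠ ks.length then none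
    else some (rowsB n ks.length ks)

-- ===== PRECONDITION & SPEC =====
def Spec_convert_key_to_matrix (key : String) (out : Option (List (List Int))) : Prop := out = convert_key_to_matrix_alt key
instance (key : String) (out : Option (List (List Int))) : Decidable (Spec_convert_key_to_matrix key out) := by unfold Spec_convert_key_to_matrix; infer_instance

-- ===== CLAIM (what is proved, stated in full; the proofs are below) =====
def Claim_equal_convert_key_to_matrix : Prop := ∀ (key : String), Dom_convert_key_to_matrix key → Spec_convert_key_to_matrix key (convert_key_to_matrix key)

-- ===== LEMMAS AND PROOFS =====

-- the value A reads through the character list equals the entry of the mapped value list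
theorem getD_vals (ks : List Char) (idx : Nat) :
    (ks.map (fun c => ((c.toNat : Int) - 65))).getD idx 0
      = ((ks.getD idx 'A').toNat : Int) - 65 := by
  simp only [List.getD, List.getElem?_map]
  cases h : ks[idx]? <;> simp

-- the inner loop fills row i left to right from position idx of vals
theorem inner_fold (vals : List Int) (n i idx : Nat) :
    ∀ k, k ≤ n → ∀ (m : List (List Int)), i < m.length → (m.getD i []).length = n →
    (List.range k).foldl
        (fun (st : List (List Int) × Nat) j =>
          (st.1.set i ((st.1.getD i []).set j (vals.getD st.2 0)), st.2 + 1)) (m, idx)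
      = (m.set i (((List.range k).map (fun j => vals.getD (idx + j) 0)) ++ (m.getD i []).drop k),
         idx + k) := by
  intro k
  induction k with
  | zero =>
    intro _ m hi hr
    simp only [List.range_zero, List.foldl_nil, List.map_nil, List.nil_append, List.drop_zero,
      Nat.add_zero]
    rw [List.getD_eq_getElem _ _ hi, List.set_getElem_self]
  | succ k ih =>
    intro hk m hi hr
    rw [List.range_succ, List.foldl_append, ih (by omega) m hi hr]
    simp only [List.foldl_cons, List.foldl_nil, List.map_append, List.map_cons, List.map_nil]
    have hgd2 : ((m.set i (((List.range k).map (fun j => vals.getD (idx + j) 0))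
          ++ (m.getD i []).drop k))).getD i []
        = ((List.range k).map (fun j => vals.getD (idx + j) 0)) ++ (m.getD i []).drop k := by
      rw [List.getD_eq_getElem _ _ (by simpa using hi), List.getElem_set_self]
    rw [List.set_set, hgd2, Prod.mk.injEq]
    refine ⟨?_, by omega⟩
    congr 1
    have hlen : ((List.range k).map (fun j => vals.getD (idx + j) 0)).length = k := by simp
    have hkr : k < (m.getD i []).length := by omega
    rw [List.drop_eq_getElem_cons hkr, List.set_append_right _ _ (by omega), hlen,
      Nat.sub_self, List.set_cons_zero]
    simp

-- the outer loop turns the zero matrix into the chunked matrix row by row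
theorem outer_fold (vals : List Int) (n : Nat) :
    ∀ k, k ≤ n →
    (List.range k).foldl
        (fun (st : List (List Int) × Nat) i =>
          (List.range n).foldl
            (fun (st : List (List Int) × Nat) j =>
              (st.1.set i ((st.1.getD i []).set j (vals.getD st.2 0)), st.2 + 1)) st)
        (List.replicate n (List.replicate n (0 : Int)), 0)
      = ((List.range k).map (fun i => (List.range n).map (fun j => vals.getD (i * n + j) 0))
          ++ List.replicate (n - k) (List.replicate n (0 : Int)), k * n) := by
  intro k
  induction k with
  | zero => simp
  | succ k ih =>
    intro hk
    rw [List.range_succ, List.foldl_append, ih (by omega)]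
    simp only [List.foldl_cons, List.foldl_nil, List.map_append, List.map_cons, List.map_nil]
    have hlen : ((List.range k).map
        (fun i => (List.range n).map (fun j => vals.getD (i * n + j) 0))).length = k := by simp
    have hgd : (((List.range k).map (fun i => (List.range n).map (fun j => vals.getD (i * n + j) 0)))
        ++ List.replicate (n - k) (List.replicate n (0 : Int))).getD k []
        = List.replicate n (0 : Int) := by
      rw [List.getD_eq_getElem _ _ (by simp; omega)]
      rw [List.getElem_append_right (by omega)]
      simp
    rw [inner_fold vals n k (k * n) n le_rfl _ (by simp; omega) (by rw [hgd]; simp)]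
    rw [hgd, Prod.mk.injEq]
    clear hgd
    have hmul : (k + 1) * n = k * n + n := Nat.succ_mul k n
    refine ⟨?_, by omega⟩
    rw [List.drop_replicate, Nat.sub_self, List.replicate_zero, List.append_nil]
    have hrep : List.replicate (n - k) (List.replicate n (0 : Int))
        = List.replicate n (0 : Int) :: List.replicate (n - (k + 1)) (List.replicate n (0 : Int)) := by
      rw [show n - k = (n - (k + 1)) + 1 from by omega, List.replicate_succ]
    rw [hrep, List.set_append_right _ _ (by omega)]
    simp

-- B's counter search reaches s when L is the perfect square s * s
theorem findN_eq_of_sq (L s : Nat) (hs : s * s = L) :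
    ∀ (k n : Nat), s - n ≤ k → n ≤ s → findN L n = s := by
  intro k
  induction k with
  | zero =>
    intro n h1 h2
    have he : n = s := by omega
    subst he
    rw [findN, dif_neg (by omega)]
  | succ k ih =>
    intro n h1 h2
    by_cases he : n = s
    · subst he
      rw [findN, dif_neg (by omega)]
    · have hlt : n < s := by omega
      have hml : n * n < s * s := Nat.mul_self_lt_mul_self hlt
      rw [findN, dif_pos (by omega)]
      exact ih (n + 1) (by omega) (by omega)

-- if the counter search lands on an exact square root, L is a perfect square
theorem sqrt_of_findN (L : Nat) (h : findN L 0 * findN L 0 = L) :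
    Nat.sqrt L * Nat.sqrt L = L := by
  have hm : Nat.sqrt L = findN L 0 := by
    conv_lhs => rw [← h]
    exact Nat.sqrt_eq (findN L 0)
  rw [hm, h]

-- the first chunk of the value list, as B's head row
theorem take_map_eq_range (f : Char → Int) (s : List Char) (n : Nat) (h : n ≤ s.length) :
    (s.take n).map f = (List.range n).map (fun j => (s.map f).getD j 0) := by
  apply List.ext_getElem
  · simp [Nat.min_eq_left h]
  · intro j hj1 hj2
    have hjn : j < n := by simpa using hj2
    simp only [List.getElem_map, List.getElem_take, List.getElem_range]
    rw [List.getD_eq_getElem _ _ (by simp; omega), List.getElem_map]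

-- B's recursive chunker produces exactly the row-major chunks of the value list
theorem rowsB_eq (n : Nat) (hn : 0 < n) :
    ∀ (k fuel : Nat) (s : List Char), s.length = k * n → s.length ≤ fuel →
    rowsB n fuel s
      = (List.range k).map (fun i => (List.range n).map
          (fun j => (s.map (fun c => ((c.toNat : Int) - 65))).getD (i * n + j) 0)) := by
  intro k
  induction k with
  | zero =>
    intro fuel s hl _
    have hnil : s = [] := List.eq_nil_of_length_eq_zero (by omega)
    subst hnil
    cases fuel <;> simp [rowsB]
  | succ k ih =>
    intro fuel s hl hf
    have hmul : (k + 1) * n = k * n + n := Nat.succ_mul k n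
    have hsn : n ≤ s.length := by omega
    obtain ⟨c, rest, rfl⟩ : ∃ c rest, s = c :: rest := by
      cases s with
      | nil => simp at hl; omega
      | cons c rest => exact ⟨c, rest, rfl⟩
    obtain ⟨f, rfl⟩ : ∃ f, fuel = f + 1 := by
      cases fuel with
      | zero => simp at hf
      | succ f => exact ⟨f, rfl⟩
    show ((c :: rest).take n).map (fun c => ((c.toNat : Int) - 65))
        :: rowsB n f ((c :: rest).drop n) = _
    rw [List.range_succ_eq_map, List.map_cons, List.map_map]
    have hdl : ((c :: rest).drop n).length = k * n := by
      rw [List.length_drop]; omega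
    have hdf : ((c :: rest).drop n).length ≤ f := by
      rw [List.length_drop]; omega
    congr 1
    · simp only [Nat.zero_mul, Nat.zero_add]
      exact take_map_eq_range _ _ _ hsn
    · rw [ih f _ hdl hdf]
      apply List.map_congr_left
      intro i _
      simp only [Function.comp, Nat.succ_eq_add_one]
      apply List.map_congr_left
      intro j _
      rw [List.map_drop]
      simp only [List.getD, List.getElem?_drop]
      rw [show n + (i * n + j) = (i + 1) * n + j from by
        have h2 : (i + 1) * n = i * n + n := Nat.succ_mul i n
        omega]

-- a string that passes Python's isalpha test is nonempty
theorem strIsalpha_ne_nil (ks : List Char) (h : PySem.Chars.strIsalpha ks = true) : ks ≠ [] := by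
  intro he
  subst he
  exact absurd h (by decide)

-- ===== VERDICT (by name: the statement is the Claim_ definition above) =====
theorem convert_key_to_matrix_spec : Claim_equal_convert_key_to_matrix := by
  intro key _
  unfold Spec_convert_key_to_matrix convert_key_to_matrix convert_key_to_matrix_alt
  simp only [PySem.Str.toList_upper]
  generalize hks : PySem.Chars.upper key.toList = ks
  by_cases ha : PySem.Chars.strIsalpha ks
  · have hna : ¬((!PySem.Chars.strIsalpha ks) = true) := by simp [ha]
    rw [if_neg hna, if_neg hna]
    have hne : ks ≠ [] := strIsalpha_ne_nil ks ha
    have hL1 : 1 ≤ ks.length := by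
      cases ks with
      | nil => exact absurd rfl hne
      | cons c t => simp
    by_cases hsq : Nat.sqrt ks.length * Nat.sqrt ks.length = ks.length
    · -- perfect square: both guards pass, matrices coincide
      have hfind : findN ks.length 0 = Nat.sqrt ks.length :=
        findN_eq_of_sq ks.length (Nat.sqrt ks.length) hsq (Nat.sqrt ks.length) 0 (by omega) (by omega)
      have hq : ¬(Nat.sqrt ks.length * Nat.sqrt ks.length ≠ ks.length) := by omega
      rw [if_neg hq, hfind, if_neg hq]
      have hstep : (fun (st : List (List Int) × Nat) (i : Nat) =>
            (List.range (Nat.sqrt ks.length)).foldl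
              (fun (st : List (List Int) × Nat) j =>
                (st.1.set i ((st.1.getD i []).set j (((ks.getD st.2 'A').toNat : Int) - 65)),
                 st.2 + 1)) st)
          = (fun (st : List (List Int) × Nat) (i : Nat) =>
            (List.range (Nat.sqrt ks.length)).foldl
              (fun (st : List (List Int) × Nat) j =>
                (st.1.set i ((st.1.getD i []).set j
                  ((ks.map (fun c => ((c.toNat : Int) - 65))).getD st.2 0)), st.2 + 1)) st) := by
        funext st i
        congr 1
        funext st j
        rw [getD_vals]
      have hinit : (List.range (Nat.sqrt ks.length)).map
            (fun _ => (List.range (Nat.sqrt ks.length)).map (fun _ => (0 : Int)))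
          = List.replicate (Nat.sqrt ks.length) (List.replicate (Nat.sqrt ks.length) (0 : Int)) := by
        simp [List.map_const']
      have hspos : 0 < Nat.sqrt ks.length := by
        rcases Nat.eq_zero_or_pos (Nat.sqrt ks.length) with h0 | h
        · rw [h0] at hsq; omega
        · exact h
      rw [hstep, hinit,
        outer_fold (ks.map (fun c => ((c.toNat : Int) - 65))) (Nat.sqrt ks.length)
          (Nat.sqrt ks.length) le_rfl]
      rw [rowsB_eq (Nat.sqrt ks.length) hspos (Nat.sqrt ks.length) ks.length ks hsq.symm le_rfl]
      simp
    · -- not a perfect square: both guards fail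
      have hq : Nat.sqrt ks.length * Nat.sqrt ks.length ≠ ks.length := hsq
      rw [if_pos hq]
      have hq2 : findN ks.length 0 * findN ks.length 0 ≠ ks.length := by
        intro h
        exact hsq (sqrt_of_findN ks.length h)
      rw [if_pos hq2]
  · have hpa : (!PySem.Chars.strIsalpha ks) = true := by simp [ha]
    rw [if_pos hpa, if_pos hpa]
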